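-- pv_equiv track=rewrite | github.com/KuschiKuschbert/wooliesbot | scripts/e2e_validate.py | _layer_summary
-- ===== SOURCE A (Python) =====
-- def _layer_summary(results):
--     return {
--         "ok": sum(1 for r in results if r.get("match") == "OK"),
--         "diff": sum(1 for r in results if r.get("match") == "DIFF"),
--         "warn": sum(1 for r in results if r.get("match") == "WARN"),
--         "dead": sum(1 for r in results if r.get("match") == "DEAD"),
--         "skip": sum(1 for r in results if r.get("match") == "SKIP"),
--         "total": len(results),
--     }
-- ===== SOURCE B (Python) =====
-- def _layer_summary(results):
--     ok = diff = warn = dead = skip = 0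
--     for r in results:
--         m = r.get("match")
--         if m == "OK":
--             ok += 1
--         elif m == "DIFF":
--             diff += 1
--         elif m == "WARN":
--             warn += 1
--         elif m == "DEAD":
--             dead += 1
--         elif m == "SKIP":
--             skip += 1
--     return {
--         "ok": ok,
--         "diff": diff,
--         "warn": warn,
--         "dead": dead,
--         "skip": skip,
--         "total": len(results),
--     }
-- ===== Notes on version B (the rewrite author's own statement) =====
-- stated objective: simpler
-- what changed: Replaces A's five independent generator scans of results (one per category) with a single loop that tallies all five counters at once in an if/elif chain.
import Mathlib
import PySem

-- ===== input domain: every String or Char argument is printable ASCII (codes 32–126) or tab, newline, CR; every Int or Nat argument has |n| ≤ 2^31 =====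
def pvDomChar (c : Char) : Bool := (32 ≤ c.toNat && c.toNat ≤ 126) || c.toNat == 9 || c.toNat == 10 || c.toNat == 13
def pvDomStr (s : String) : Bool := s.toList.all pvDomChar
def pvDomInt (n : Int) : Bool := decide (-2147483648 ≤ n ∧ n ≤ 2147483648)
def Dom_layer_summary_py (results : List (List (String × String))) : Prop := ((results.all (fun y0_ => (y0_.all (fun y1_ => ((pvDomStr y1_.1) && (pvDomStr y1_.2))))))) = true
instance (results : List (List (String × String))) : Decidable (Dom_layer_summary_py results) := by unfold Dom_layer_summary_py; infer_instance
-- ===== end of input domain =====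

-- B replaces A's five independent per-category scans with one loop tallying five counters at once (objective: simpler).

-- ===== PORT A =====
-- r.get("match") on the dict r (association list, first match wins)
def pvGetMatch (r : List (String × String)) : Option String :=
  (PySem.Dict.mk r).get? "match"

-- sum(1 for r in results if r.get("match") == tag)
def pvCountTag (results : List (List (String × String))) (tag : String) : Int :=
  results.foldl (fun acc r => if pvGetMatch r = some tag then acc + 1 else acc) 0

def layer_summary_py (results : List (List (String × String))) : List (String × Int) :=
  [ ("ok", pvCountTag results "OK"),
    ("diff", pvCountTag results "DIFF"),
    ("warn", pvCountTag results "WARN"),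
    ("dead", pvCountTag results "DEAD"),
    ("skip", pvCountTag results "SKIP"),
    ("total", (results.length : Int)) ]

-- ===== PORT B =====
-- one iteration of B's loop body: m = r.get("match") (pvGetMatch), then the if/elif chain over the
-- 5-counter state (ok, diff, warn, dead, skip)
def pvTallyStep (s : Int × Int × Int × Int × Int) (r : List (String × String)) :
    Int × Int × Int × Int × Int :=
  let m := pvGetMatch r
  if m = some "OK" then (s.1 + 1, s.2.1, s.2.2.1, s.2.2.2.1, s.2.2.2.2)
  else if m = some "DIFF" then (s.1, s.2.1 + 1, s.2.2.1, s.2.2.2.1, s.2.2.2.2)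
  else if m = some "WARN" then (s.1, s.2.1, s.2.2.1 + 1, s.2.2.2.1, s.2.2.2.2)
  else if m = some "DEAD" then (s.1, s.2.1, s.2.2.1, s.2.2.2.1 + 1, s.2.2.2.2)
  else if m = some "SKIP" then (s.1, s.2.1, s.2.2.1, s.2.2.2.1, s.2.2.2.2 + 1)
  else s

def layer_summary_py_alt (results : List (List (String × String))) : List (String × Int) :=
  let t := results.foldl pvTallyStep (0, 0, 0, 0, 0)
  [ ("ok", t.1),
    ("diff", t.2.1),
    ("warn", t.2.2.1),
    ("dead", t.2.2.2.1),
    ("skip", t.2.2.2.2),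
    ("total", (results.length : Int)) ]

-- ===== PRECONDITION & SPEC =====
def Spec_layer_summary_py (results : List (List (String × String))) (out : List (String × Int)) : Prop := out = layer_summary_py_alt results
instance (results : List (List (String × String))) (out : List (String × Int)) : Decidable (Spec_layer_summary_py results out) := by unfold Spec_layer_summary_py; infer_instance

-- ===== CLAIM (what is proved, stated in full; the proofs are below) =====
def Claim_equal_layer_summary_py : Prop := ∀ (results : List (List (String × String))), Dom_layer_summary_py results → Spec_layer_summary_py results (layer_summary_py results)

-- ===== LEMMAS AND PROOFS =====

-- A's per-tag scan with an arbitrary starting accumulator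
def pvCnt (tag : String) (rs : List (List (String × String))) (init : Int) : Int :=
  rs.foldl (fun acc r => if pvGetMatch r = some tag then acc + 1 else acc) init

-- B's one-pass tally equals the five per-tag scans, componentwise
theorem pvTally_eq (rs : List (List (String × String))) (s : Int × Int × Int × Int × Int) :
    rs.foldl pvTallyStep s
      = (pvCnt "OK" rs s.1, pvCnt "DIFF" rs s.2.1, pvCnt "WARN" rs s.2.2.1,
         pvCnt "DEAD" rs s.2.2.2.1, pvCnt "SKIP" rs s.2.2.2.2) := by
  induction rs generalizing s with
  | nil => rfl
  | cons r rest ih =>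
    simp only [List.foldl_cons, ih, pvCnt, pvTallyStep]
    split_ifs <;> simp_all

-- ===== VERDICT (by name: the statement is the Claim_ definition above) =====
theorem layer_summary_py_spec : Claim_equal_layer_summary_py := by
  intro results _
  unfold Spec_layer_summary_py layer_summary_py layer_summary_py_alt
  rw [pvTally_eq]
  rfl
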